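-- pv_equiv track=rewrite | github.com/huynd2210/Collapsi | tools/read_records.py | render_overlay_grid
-- ===== SOURCE A (Python) =====
-- from typing import Dict, Iterator, List, Optional, Tuple
--
-- def _card_char(a: int, b2: int, b3: int, b4: int, idx: int) -> str:
--     bit = 1 << idx
--     if a & bit:
--         return "A"
--     if b2 & bit:
--         return "2"
--     if b3 & bit:
--         return "3"
--     if b4 & bit:
--         return "4"
--     return "."
--
-- def render_overlay_grid(a: int, b2: int, b3: int, b4: int, x: int, o: int, c: int) -> str:
--     """
--     Overlay precedence: X, O, '#'(collapsed), else card char.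
--     Returns a multi-line string, 4 rows of 4 space-separated glyphs.
--     """
--     lines: List[str] = []
--     for r in range(4):
--         row: List[str] = []
--         for cidx in range(4):
--             idx = r * 4 + cidx
--             bit = 1 << idx
--             if x & bit:
--                 ch = "X"
--             elif o & bit:
--                 ch = "O"
--             elif c & bit:
--                 ch = "#"
--             else:
--                 ch = _card_char(a, b2, b3, b4, idx)
--             row.append(ch)
--         lines.append(" ".join(row))
--     return "\n".join(lines)
-- ===== SOURCE B (Python) =====
-- def render_overlay_grid(a: int, b2: int, b3: int, b4: int, x: int, o: int, c: int) -> str: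
--     """Layer-painting re-implementation: paint glyph layers onto a flat
--     16-cell grid in reverse precedence order (last writer wins)."""
--     grid = ["."] * 16
--     for mask, glyph in ((b4, "4"), (b3, "3"), (b2, "2"), (a, "A"), (c, "#"), (o, "O"), (x, "X")):
--         for idx in range(16):
--             if mask & (1 << idx):
--                 grid[idx] = glyph
--     return "\n".join(" ".join(grid[r * 4 : r * 4 + 4]) for r in range(4))
-- ===== Notes on version B (the rewrite author's own statement) =====
-- stated objective: alternative
-- what changed: Replaces A's per-cell precedence cascade (nested row/column loops calling _card_char) with sequential last-writer-wins layer painting over a flat 16-cell grid, then slicing into rows.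
import Mathlib
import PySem

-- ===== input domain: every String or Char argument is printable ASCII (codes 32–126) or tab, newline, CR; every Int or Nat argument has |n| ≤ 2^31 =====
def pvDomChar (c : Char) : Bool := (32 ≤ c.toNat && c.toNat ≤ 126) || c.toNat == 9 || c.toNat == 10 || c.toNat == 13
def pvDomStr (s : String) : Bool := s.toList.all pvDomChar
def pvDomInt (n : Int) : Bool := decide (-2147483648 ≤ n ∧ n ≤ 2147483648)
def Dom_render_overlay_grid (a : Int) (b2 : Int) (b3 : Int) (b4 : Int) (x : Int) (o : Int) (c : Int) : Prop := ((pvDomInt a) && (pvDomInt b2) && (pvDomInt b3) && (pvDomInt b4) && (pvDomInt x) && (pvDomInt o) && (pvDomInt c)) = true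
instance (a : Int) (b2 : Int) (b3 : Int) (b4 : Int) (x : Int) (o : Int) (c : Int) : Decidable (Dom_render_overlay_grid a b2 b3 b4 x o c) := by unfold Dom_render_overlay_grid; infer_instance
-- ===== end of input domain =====

-- B replaces A's per-cell precedence cascade with last-writer-wins layer painting; same output.

-- ===== PORT A =====
-- helper _card_char of A, step for step
def pvCardChar (a : Int) (b2 : Int) (b3 : Int) (b4 : Int) (idx : Int) : String :=
  let bit : Int := 1 <<< idx.toNat
  if PySem.Int.band a bit ≠ 0 then "A"
  else if PySem.Int.band b2 bit ≠ 0 then "2"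
  else if PySem.Int.band b3 bit ≠ 0 then "3"
  else if PySem.Int.band b4 bit ≠ 0 then "4"
  else "."

def render_overlay_grid (a : Int) (b2 : Int) (b3 : Int) (b4 : Int) (x : Int) (o : Int) (c : Int) : String :=
  let lines : List String :=
    (PySem.List.pyRange 0 4 1).foldl (fun lines r =>
      let row : List String :=
        (PySem.List.pyRange 0 4 1).foldl (fun row cidx =>
          let idx : Int := r * 4 + cidx
          let bit : Int := 1 <<< idx.toNat
          let ch : String :=
            if PySem.Int.band x bit ≠ 0 then "X"
            else if PySem.Int.band o bit ≠ 0 then "O"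
            else if PySem.Int.band c bit ≠ 0 then "#"
            else pvCardChar a b2 b3 b4 idx
          row ++ [ch]) []
      lines ++ [PySem.Str.join " " row]) []
  PySem.Str.join "\n" lines

-- ===== PORT B =====
-- paint one layer: set grid[idx] to glyph wherever mask has bit idx
-- loop body of the painting loop (grid[idx] = glyph if mask bit idx is set)
def pvPaintStep (mask : Int) (glyph : String) (g : List String) (idx : Int) : List String :=
  if PySem.Int.band mask ((1 : Int) <<< idx.toNat) ≠ 0 then g.set idx.toNat glyph else g

def pvPaint (grid : List String) (mask : Int) (glyph : String) : List String :=
  (PySem.List.pyRange 0 16 1).foldl (pvPaintStep mask glyph) grid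

def render_overlay_grid_alt (a : Int) (b2 : Int) (b3 : Int) (b4 : Int) (x : Int) (o : Int) (c : Int) : String :=
  let grid : List String :=
    [(b4, "4"), (b3, "3"), (b2, "2"), (a, "A"), (c, "#"), (o, "O"), (x, "X")].foldl
      (fun g p => pvPaint g p.1 p.2) (List.replicate 16 ".")
  PySem.Str.join "\n"
    ((PySem.List.pyRange 0 4 1).map (fun r =>
      PySem.Str.join " " (PySem.List.slice grid (some (r * 4)) (some (r * 4 + 4)))))

-- ===== PRECONDITION & SPEC =====
def Spec_render_overlay_grid (a : Int) (b2 : Int) (b3 : Int) (b4 : Int) (x : Int) (o : Int) (c : Int) (out : String) : Prop := out = render_overlay_grid_alt a b2 b3 b4 x o c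
instance (a : Int) (b2 : Int) (b3 : Int) (b4 : Int) (x : Int) (o : Int) (c : Int) (out : String) : Decidable (Spec_render_overlay_grid a b2 b3 b4 x o c out) := by unfold Spec_render_overlay_grid; infer_instance

-- ===== CLAIM (what is proved, stated in full; the proofs are below) =====
def Claim_equal_render_overlay_grid : Prop := ∀ (a : Int) (b2 : Int) (b3 : Int) (b4 : Int) (x : Int) (o : Int) (c : Int), Dom_render_overlay_grid a b2 b3 b4 x o c → Spec_render_overlay_grid a b2 b3 b4 x o c (render_overlay_grid a b2 b3 b4 x o c)

-- ===== LEMMAS AND PROOFS =====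

theorem pvPaintStep_length (m : Int) (gl : String) (g : List String) (i : Int) :
    (pvPaintStep m gl g i).length = g.length := by
  unfold pvPaintStep; split <;> simp

theorem pvPaint_foldl_length (m : Int) (gl : String) (L : List Int) :
    ∀ (g : List String), (L.foldl (pvPaintStep m gl) g).length = g.length := by
  induction L with
  | nil => intro g; rfl
  | cons i L ih =>
    intro g
    rw [List.foldl_cons, ih, pvPaintStep_length]

theorem pvPaint_length (g : List String) (m : Int) (gl : String) :
    (pvPaint g m gl).length = g.length :=
  pvPaint_foldl_length m gl _ g

theorem pvPaintStep_getD_ne (m : Int) (gl : String) (g : List String) (i : Int) (k : Nat)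
    (hnat : i.toNat ≠ k) : (pvPaintStep m gl g i).getD k "." = g.getD k "." := by
  unfold pvPaintStep
  split
  · simp [List.getD_eq_getElem?_getD, List.getElem?_set_ne hnat]
  · rfl

theorem pvPaintStep_getD_self_pos (m : Int) (gl : String) (g : List String) (i : Int) (k : Nat)
    (hk : k < g.length) (hnat : i.toNat = k)
    (hc : PySem.Int.band m (HShiftLeft.hShiftLeft (1 : Int) k) ≠ 0) :
    (pvPaintStep m gl g i).getD k "." = gl := by
  unfold pvPaintStep
  rw [hnat, if_pos hc]
  simp [List.getD_eq_getElem?_getD, List.getElem?_set_self', List.getElem?_eq_getElem hk]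

theorem pvPaintStep_getD_self_neg (m : Int) (gl : String) (g : List String) (i : Int) (k : Nat)
    (hnat : i.toNat = k)
    (hc : ¬ PySem.Int.band m (HShiftLeft.hShiftLeft (1 : Int) k) ≠ 0) :
    (pvPaintStep m gl g i).getD k "." = g.getD k "." := by
  unfold pvPaintStep
  rw [hnat, if_neg hc]

theorem pvPaint_foldl_getD (m : Int) (gl : String) (L : List Int) (hL : ∀ i ∈ L, 0 ≤ i) :
    ∀ (g : List String) (k : Nat), k < g.length →
      (L.foldl (pvPaintStep m gl) g).getD k "."
      = if (k : Int) ∈ L ∧ PySem.Int.band m (HShiftLeft.hShiftLeft (1 : Int) k) ≠ 0 then gl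
        else g.getD k "." := by
  induction L with
  | nil => intro g k hk; simp
  | cons i L ih =>
    intro g k hk
    have h0 : 0 ≤ i := hL i (List.mem_cons_self)
    have hL' : ∀ j ∈ L, 0 ≤ j := fun j hj => hL j (List.mem_cons_of_mem _ hj)
    rw [List.foldl_cons, ih hL' _ k (by rw [pvPaintStep_length]; exact hk)]
    by_cases hik : (k : Int) = i
    · have hnat : i.toNat = k := by omega
      by_cases hc : PySem.Int.band m (HShiftLeft.hShiftLeft (1 : Int) k) ≠ 0
      · rw [pvPaintStep_getD_self_pos m gl g i k hk hnat hc]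
        simp [hc, hik]
      · rw [pvPaintStep_getD_self_neg m gl g i k hnat hc]
        simp [hc]
    · have hnat : i.toNat ≠ k := by omega
      rw [pvPaintStep_getD_ne m gl g i k hnat]
      simp [List.mem_cons, hik]

theorem getD_map_range16 (f : Nat → String) (k : Nat) (hk : k < 16) :
    ((List.range 16).map f).getD k "." = f k := by
  rw [List.getD_eq_getElem _ "." (by simpa using hk)]
  simp

theorem pvPaint_eq_map (g : List String) (m : Int) (gl : String) (h : g.length = 16) :
    pvPaint g m gl
      = (List.range 16).map (fun (k : Nat) =>
          if PySem.Int.band m (HShiftLeft.hShiftLeft (1 : Int) k) ≠ 0 then gl else g.getD k ".") := by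
  apply List.ext_getElem
  · rw [pvPaint_length]; simp [h]
  · intro k h1 h2
    rw [pvPaint_length] at h1
    have hk16 : k < 16 := by omega
    rw [← List.getD_eq_getElem _ ".", ← List.getD_eq_getElem _ "."]
    rw [pvPaint, pvPaint_foldl_getD m gl _
      (by intro i hi; have := PySem.List.mem_pyRange_one.mp hi; omega) g k (by omega)]
    have hm : ((k : Int) ∈ PySem.List.pyRange 0 16 1) := by
      rw [PySem.List.mem_pyRange_one]; omega
    rw [getD_map_range16 _ k hk16]
    simp [hm]

theorem grid_eq (a b2 b3 b4 x o c : Int) :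
    ([(b4, "4"), (b3, "3"), (b2, "2"), (a, "A"), (c, "#"), (o, "O"), (x, "X")].foldl
        (fun g p => pvPaint g p.1 p.2) (List.replicate 16 "."))
      = (List.range 16).map (fun (k : Nat) =>
          if PySem.Int.band x (HShiftLeft.hShiftLeft (1 : Int) k) ≠ 0 then "X"
          else if PySem.Int.band o (HShiftLeft.hShiftLeft (1 : Int) k) ≠ 0 then "O"
          else if PySem.Int.band c (HShiftLeft.hShiftLeft (1 : Int) k) ≠ 0 then "#"
          else if PySem.Int.band a (HShiftLeft.hShiftLeft (1 : Int) k) ≠ 0 then "A"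
          else if PySem.Int.band b2 (HShiftLeft.hShiftLeft (1 : Int) k) ≠ 0 then "2"
          else if PySem.Int.band b3 (HShiftLeft.hShiftLeft (1 : Int) k) ≠ 0 then "3"
          else if PySem.Int.band b4 (HShiftLeft.hShiftLeft (1 : Int) k) ≠ 0 then "4"
          else ".") := by
  simp only [List.foldl_cons, List.foldl_nil]
  rw [pvPaint_eq_map _ b4 _ (by simp),
      pvPaint_eq_map _ b3 _ (by simp),
      pvPaint_eq_map _ b2 _ (by simp),
      pvPaint_eq_map _ a _ (by simp),
      pvPaint_eq_map _ c _ (by simp),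
      pvPaint_eq_map _ o _ (by simp),
      pvPaint_eq_map _ x _ (by simp)]
  refine List.map_congr_left fun k hk => ?_
  have hk16 : k < 16 := by simpa using hk
  have hrep : (List.replicate 16 (".":String)).getD k "." = "." := by
    rw [List.getD_eq_getElem _ "." (by simpa using hk16)]
    exact List.getElem_replicate _
  simp only [getD_map_range16 _ k hk16, hrep]

-- ===== VERDICT (by name: the statement is the Claim_ definition above) =====
theorem render_overlay_grid_spec : Claim_equal_render_overlay_grid := by
  intro a b2 b3 b4 x o c _
  show render_overlay_grid a b2 b3 b4 x o c = render_overlay_grid_alt a b2 b3 b4 x o c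
  rw [render_overlay_grid_alt]
  rw [grid_eq]
  simp only [render_overlay_grid, pvCardChar, PySem.List.pyRange, PySem.List.slice]
  norm_num [PySem.List.clampIdx, Nat.shiftLeft_eq, Int.shiftLeft_eq]
  simp only [show ((4:Int).toNat) = 4 from rfl, List.range_succ, List.range_zero,
    List.map_append, List.map_cons, List.map_nil, List.flatten_append, List.flatten_cons,
    List.flatten_nil, Function.comp, List.append_nil, List.nil_append]
  norm_num
  norm_num [show ((2:Int).toNat) = 2 from rfl, show ((3:Int).toNat) = 3 from rfl, show ((4:Int).toNat) = 4 from rfl, show ((5:Int).toNat) = 5 from rfl, show ((6:Int).toNat) = 6 from rfl, show ((7:Int).toNat) = 7 from rfl, show ((8:Int).toNat) = 8 from rfl, show ((9:Int).toNat) = 9 from rfl, show ((10:Int).toNat) = 10 from rfl, show ((11:Int).toNat) = 11 from rfl, show ((12:Int).toNat) = 12 from rfl, show ((13:Int).toNat) = 13 from rfl, show ((14:Int).toNat) = 14 from rfl, show ((15:Int).toNat) = 15 from rfl, show ((16:Int).toNat) = 16 from rfl]
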